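-- pv_equiv track=rewrite | github.com/betocmn/wannamigrate | django/wannamigrate/core/util.py | get_country_points_css_class
-- ===== SOURCE A (Python) =====
-- def get_country_points_css_class( percentage ):
--     """
--     Returns the css class for the approximate percentage for user country points
--     :param: points
--     :param: css_class_color
--     :return: String
--     """
--
--     # If zero, return empty css class
--     if percentage == 0:
--         return 'orange6'
--
--     # if it's 100% full
--     if percentage >= 100:
--         return 'green96'
--
--     # These are the percentages defined by css classes in 'style.css'
--     possible_percentages = [6, 12, 18, 24, 30, 36, 42, 48, 54, 60, 66, 72, 78, 84, 90, 96]
--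
--     # Define the color of the bar
--     if percentage <= 30:
--         color = 'orange'
--     elif percentage <= 70:
--         color = 'yellow'
--     else:
--         color = 'green'
--
--     # We will find the nearest number on the possible list to represent it
--     list_size = len( possible_percentages )
--     for count in range( 0, list_size ):
--         if percentage < possible_percentages[count]:
--             if count == 0:
--                 return color + str( possible_percentages[count] )
--             else:
--                 return color + str( possible_percentages[count-1] )
--         elif ( count + 1 ) == list_size:
--             return color + str( possible_percentages[count-1] )
--
--     return ''
-- ===== SOURCE B (Python) =====
-- def get_country_points_css_class(percentage):
--     """Closed-form bucket arithmetic instead of scanning the percentage list."""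
--     if percentage == 0:
--         return 'orange6'
--     if percentage >= 100:
--         return 'green96'
--     color = 'orange' if percentage <= 30 else ('yellow' if percentage <= 70 else 'green')
--     bucket = int((percentage // 6) * 6)
--     bucket = 6 if bucket < 6 else (90 if bucket > 90 else bucket)
--     return color + str(bucket)
-- ===== Notes on version B (the rewrite author's own statement) =====
-- stated objective: simpler
-- what changed: Replaces the 16-element possible_percentages list and its early-exit scan with one closed-form floor-division bucket ((percentage // 6) * 6) clamped to [6, 90].
import Mathlib
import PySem

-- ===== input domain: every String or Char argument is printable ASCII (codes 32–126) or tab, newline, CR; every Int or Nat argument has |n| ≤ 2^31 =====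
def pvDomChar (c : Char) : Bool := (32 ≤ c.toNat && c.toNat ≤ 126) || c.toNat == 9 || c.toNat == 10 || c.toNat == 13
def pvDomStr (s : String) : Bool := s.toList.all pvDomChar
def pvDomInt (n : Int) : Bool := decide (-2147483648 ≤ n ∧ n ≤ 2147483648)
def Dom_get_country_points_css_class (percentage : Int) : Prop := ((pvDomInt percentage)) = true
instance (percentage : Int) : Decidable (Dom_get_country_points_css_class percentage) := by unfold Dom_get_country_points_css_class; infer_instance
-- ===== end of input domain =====

-- B replaces A's 16-element list scan with one closed-form floor-division bucket (objective: simpler).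

-- ===== PORT A =====
-- the for-loop over range(0, list_size) with early returns, transcribed as structural
-- recursion over the list of counts [0, …, 15]
def pvALoop (percentage : Int) (possible : List Int) (color : String) (list_size : Nat)
    (counts : List Nat) : String :=
  match counts with
  | [] => ""
  | count :: rest =>
    if percentage < possible.getD count 0 then
      if count == 0 then color ++ PySem.Int.toStr (possible.getD count 0)
      else color ++ PySem.Int.toStr (possible.getD (count - 1) 0)
    else if count + 1 == list_size then color ++ PySem.Int.toStr (possible.getD (count - 1) 0)
    else pvALoop percentage possible color list_size rest

def get_country_points_css_class (percentage : Int) : String :=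
  if percentage == 0 then "orange6"
  else if percentage ≥ 100 then "green96"
  else
    let possible_percentages : List Int := [6, 12, 18, 24, 30, 36, 42, 48, 54, 60, 66, 72, 78, 84, 90, 96]
    let color := if percentage ≤ 30 then "orange"
                 else if percentage ≤ 70 then "yellow"
                 else "green"
    let list_size := possible_percentages.length
    pvALoop percentage possible_percentages color list_size (List.range list_size)

-- ===== PORT B =====
def get_country_points_css_class_alt (percentage : Int) : String :=
  if percentage == 0 then "orange6"
  else if percentage ≥ 100 then "green96"
  else
    let color := if percentage ≤ 30 then "orange"
                 else if percentage ≤ 70 then "yellow"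
                 else "green"
    let bucket := PySem.Int.floordiv percentage 6 * 6
    let bucket := if bucket < 6 then 6 else if bucket > 90 then 90 else bucket
    color ++ PySem.Int.toStr bucket

-- ===== PRECONDITION & SPEC =====
def Spec_get_country_points_css_class (percentage : Int) (out : String) : Prop := out = get_country_points_css_class_alt percentage
instance (percentage : Int) (out : String) : Decidable (Spec_get_country_points_css_class percentage out) := by unfold Spec_get_country_points_css_class; infer_instance

-- ===== CLAIM (what is proved, stated in full; the proofs are below) =====
def Claim_equal_get_country_points_css_class : Prop := ∀ (percentage : Int), Dom_get_country_points_css_class percentage → Spec_get_country_points_css_class percentage (get_country_points_css_class percentage)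

-- ===== LEMMAS AND PROOFS =====

-- For negative percentages both programs yield "orange6"
lemma neg_case (p : Int) (hp : p < 0) :
    get_country_points_css_class p = get_country_points_css_class_alt p := by
  have h0 : ¬ (p == 0) = true := by simp; omega
  have h100 : ¬ p ≥ 100 := by omega
  have h30 : p ≤ 30 := by omega
  have h6 : p < 6 := by omega
  simp [get_country_points_css_class, get_country_points_css_class_alt, pvALoop, List.range,
        List.range.loop, h0, h100, h30, h6]
  have hlt : p / 6 < 1 := by omega
  rw [if_pos hlt]

-- For 1 ≤ p ≤ 99 both sides are closed computations: check each value
lemma pos_case (p : Int) (h1 : 1 ≤ p) (h2 : p ≤ 99) :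
    get_country_points_css_class p = get_country_points_css_class_alt p := by
  interval_cases p <;> decide

-- ===== VERDICT (by name: the statement is the Claim_ definition above) =====
theorem get_country_points_css_class_spec : Claim_equal_get_country_points_css_class := by
  intro p _
  unfold Spec_get_country_points_css_class
  rcases lt_trichotomy p 0 with hneg | h0 | hpos
  · exact neg_case p hneg
  · subst h0; decide
  · by_cases h100 : 100 ≤ p
    · have h0 : ¬ (p == 0) = true := by simp; omega
      simp [get_country_points_css_class, get_country_points_css_class_alt, h0, h100]
    · exact pos_case p hpos (by omega)
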